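-- pv_equiv track=rewrite | github.com/jthorvaldur/words_quantum_legal | src/basis_map_viz.py | is_vcc_negated
-- ===== SOURCE A (Python) =====
-- VCC_PREFIXES = {
--     "in": "no", "im": "no", "il": "no", "ir": "no",
--     "as": "no", "a": "no/without", "o": "no",
--     "un": "not/reverse", "ab": "away from", "ex": "out of",
--     "en": "into", "em": "into",
-- }
--
-- VOWELS = set("aeiou")
--
-- def is_vcc_negated(word: str) -> bool:
--     """Check if a word begins with a VCC negation prefix."""
--     w = word.lower()
--     for prefix in sorted(VCC_PREFIXES, key=len, reverse=True):
--         if w.startswith(prefix) and len(w) > len(prefix) + 1: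
--             after = w[len(prefix)]
--             if after not in VOWELS:
--                 return True
--     return False
-- ===== SOURCE B (Python) =====
-- VOWELS = set("aeiou")
--
-- # Character-level trie of the negation prefixes:
-- # NEXT_OF[c] = the characters that may follow c to form a two-letter prefix,
-- # SINGLE     = the characters that are prefixes on their own.
-- NEXT_OF = {'i': set("nmlr"), 'a': set("sb"), 'u': set("n"), 'e': set("xnm")}
-- SINGLE = set("ao")
--
-- def is_vcc_negated(word: str) -> bool:
--     """Check if a word begins with a VCC negation prefix."""
--     w = word.lower()
--     n = len(w)
--     if n > 3 and w[1] in NEXT_OF.get(w[0], set()) and w[2] not in VOWELS: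
--         return True
--     return n > 2 and w[0] in SINGLE and w[1] not in VOWELS
-- ===== Notes on version B (the rewrite author's own statement) =====
-- stated objective: alternative
-- what changed: Replaces A's loop over all prefixes sorted by length (startswith + dict) with a loop-free two-level character trie: first character selects the set of admissible second characters for a two-letter prefix, plus a single-letter prefix set, decided by direct indexing.
import Mathlib
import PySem

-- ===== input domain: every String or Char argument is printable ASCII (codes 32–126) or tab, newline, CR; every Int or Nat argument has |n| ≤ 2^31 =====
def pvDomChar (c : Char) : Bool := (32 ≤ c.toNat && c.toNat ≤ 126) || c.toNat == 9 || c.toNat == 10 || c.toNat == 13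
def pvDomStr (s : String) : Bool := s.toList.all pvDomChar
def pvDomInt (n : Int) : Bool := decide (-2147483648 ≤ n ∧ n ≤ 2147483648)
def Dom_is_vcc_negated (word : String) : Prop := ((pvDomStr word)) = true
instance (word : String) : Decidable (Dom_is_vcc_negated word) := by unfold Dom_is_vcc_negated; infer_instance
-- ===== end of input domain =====

-- B drops A's loop over all prefixes (sorted by length, startswith each) in favour of a
-- loop-free two-level character trie keyed on the first two characters; objective: alternative.

-- ===== PORT A =====
-- module constant VCC_PREFIXES
def vccPrefixes : PySem.Dict String String := PySem.Dict.ofList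
  [("in","no"), ("im","no"), ("il","no"), ("ir","no"),
   ("as","no"), ("a","no/without"), ("o","no"),
   ("un","not/reverse"), ("ab","away from"), ("ex","out of"),
   ("en","into"), ("em","into")]

-- module constant VOWELS = set("aeiou")
def vowels : PySem.Set Char := PySem.Set.ofList "aeiou".toList

def is_vcc_negated (word : String) : Bool :=
  let w := PySem.Str.lower word
  (PySem.List.sorted vccPrefixes.keys (fun p => PySem.Str.len p) true).any fun pre =>
    PySem.Str.startswith w pre && decide (PySem.Str.len w > PySem.Str.len pre + 1) &&
      (match PySem.Str.pyGet? w (PySem.Str.len pre) with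
       | some after => !(PySem.Set.contains vowels after)
       | none => false)

-- ===== PORT B =====
-- module constants NEXT_OF (trie second-character sets) and SINGLE (one-letter prefixes)
def nextOf : PySem.Dict Char (PySem.Set Char) := PySem.Dict.ofList
  [('i', PySem.Set.ofList "nmlr".toList), ('a', PySem.Set.ofList "sb".toList),
   ('u', PySem.Set.ofList "n".toList), ('e', PySem.Set.ofList "xnm".toList)]

def singleSet : PySem.Set Char := PySem.Set.ofList "ao".toList

def is_vcc_negated_alt (word : String) : Bool :=
  let w := PySem.Str.lower word
  let n := PySem.Str.len w
  if decide (n > 3) &&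
      (match PySem.Str.pyGet? w 0, PySem.Str.pyGet? w 1 with
       | some c0, some c1 => PySem.Set.contains (nextOf.getD c0 PySem.Set.empty) c1
       | _, _ => false) &&
      (match PySem.Str.pyGet? w 2 with
       | some c2 => !(PySem.Set.contains vowels c2)
       | none => false) then
    true
  else
    decide (n > 2) &&
      (match PySem.Str.pyGet? w 0 with
       | some c0 => PySem.Set.contains singleSet c0
       | none => false) &&
      (match PySem.Str.pyGet? w 1 with
       | some c1 => !(PySem.Set.contains vowels c1)
       | none => false)

-- ===== PRECONDITION & SPEC =====
def Spec_is_vcc_negated (word : String) (out : Bool) : Prop := out = is_vcc_negated_alt word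
instance (word : String) (out : Bool) : Decidable (Spec_is_vcc_negated word out) := by unfold Spec_is_vcc_negated; infer_instance

-- ===== CLAIM =====
def Claim_equal_is_vcc_negated : Prop := ∀ (word : String), Dom_is_vcc_negated word → Spec_is_vcc_negated word (is_vcc_negated word)

-- ===== LEMMAS AND PROOFS =====

def pvVowelsL : List Char := ['a','e','i','o','u']

def pvSortedKeysLL : List (List Char) :=
  [['i','n'],['i','m'],['i','l'],['i','r'],['a','s'],['u','n'],['a','b'],['e','x'],['e','n'],['e','m'],['a'],['o']]

-- pvTwo c d: the trie accepts prefix [c, d]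
def pvTwo (c d : Char) : Bool :=
  ((c == 'i') && (d == 'n' || d == 'm' || d == 'l' || d == 'r')) ||
  ((c == 'a') && (d == 's' || d == 'b')) ||
  ((c == 'u') && (d == 'n')) ||
  ((c == 'e') && (d == 'x' || d == 'n' || d == 'm'))

def pvAcore (l : List Char) : Bool :=
  pvSortedKeysLL.any fun p =>
    List.isPrefixOf p l && decide ((l.length : Int) > (p.length : Int) + 1) &&
      (match PySem.List.pyGet? l (p.length : Int) with
       | some c => !(pvVowelsL.contains c)
       | none => false)

def pvBcore (l : List Char) : Bool :=
  if decide ((l.length : Int) > 3) &&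
      (match PySem.List.pyGet? l 0, PySem.List.pyGet? l 1 with
       | some c0, some c1 => pvTwo c0 c1
       | _, _ => false) &&
      (match PySem.List.pyGet? l 2 with
       | some c2 => !(pvVowelsL.contains c2)
       | none => false) then
    true
  else
    decide ((l.length : Int) > 2) &&
      (match PySem.List.pyGet? l 0 with
       | some c0 => (c0 == 'a' || c0 == 'o')
       | none => false) &&
      (match PySem.List.pyGet? l 1 with
       | some c1 => !(pvVowelsL.contains c1)
       | none => false)

lemma pv_vow (c : Char) : PySem.Set.contains vowels c = pvVowelsL.contains c := rfl

lemma pv_next (c d : Char) :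
    PySem.Set.contains (nextOf.getD c PySem.Set.empty) d = pvTwo c d := by
  have h : nextOf = PySem.Dict.mk [('i', ['n','m','l','r']), ('a', ['s','b']),
      ('u', ['n']), ('e', ['x','n','m'])] := by rfl
  rw [h, Bool.eq_iff_iff]
  simp [PySem.Dict.getD_eq_get?_getD, PySem.Dict.get?_mk_cons, pvTwo]
  split_ifs with h1 h2 h3 h4
  · subst h1; simp; tauto
  · subst h2; simp
  · subst h3; simp
  · subst h4; simp; tauto
  · rw [show ({ items := [] } : PySem.Dict Char (PySem.Set Char)).get? c = none from rfl]
    simp only [Option.getD_none, List.not_mem_nil, false_iff]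
    rintro (((⟨h,_⟩|⟨h,_⟩)|⟨h,_⟩)|⟨h,_⟩)
    · exact h1 h.symm
    · exact h2 h.symm
    · exact h3 h.symm
    · exact h4 h.symm

lemma pv_single (c : Char) :
    PySem.Set.contains singleSet c = (c == 'a' || c == 'o') := by
  have h : singleSet = ['a','o'] := by rfl
  rw [h, Bool.eq_iff_iff]
  simp

lemma pv_itemA (w : String) (p : List Char) :
    (PySem.Str.startswith w (String.ofList p) &&
      decide (PySem.Str.len w > PySem.Str.len (String.ofList p) + 1) &&
      (match PySem.Str.pyGet? w (PySem.Str.len (String.ofList p)) with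
       | some after => !(PySem.Set.contains vowels after)
       | none => false)) =
    (List.isPrefixOf p w.toList && decide ((w.toList.length : Int) > (p.length : Int) + 1) &&
      (match PySem.List.pyGet? w.toList (p.length : Int) with
       | some c => !(pvVowelsL.contains c)
       | none => false)) := by
  simp only [pysem, pv_vow, PySem.Chars.startswith, String.toList_ofList]

lemma pvA_eq (word : String) :
    is_vcc_negated word = pvAcore (PySem.Str.lower word).toList := by
  simp only [is_vcc_negated,
    show PySem.List.sorted vccPrefixes.keys (fun p => PySem.Str.len p) true =
      pvSortedKeysLL.map (fun l => String.ofList l) from by decide,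
    List.any_map, Function.comp_def, pv_itemA, pvAcore]

lemma pvB_eq (word : String) :
    is_vcc_negated_alt word = pvBcore (PySem.Str.lower word).toList := by
  simp only [is_vcc_negated_alt, pv_next, pv_single, pv_vow]
  simp only [pvBcore, pysem]

set_option maxHeartbeats 1000000 in
lemma pv_core (l : List Char) : pvAcore l = pvBcore l := by
  match l with
  | [] => decide
  | [c] =>
    rw [Bool.eq_iff_iff]
    simp [PySem.List.pyGet?, PySem.List.pyIdx?, pvAcore, pvBcore, pvSortedKeysLL, pvVowelsL, List.isPrefixOf]
  | [c, d] =>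
    rw [Bool.eq_iff_iff]
    simp [PySem.List.pyGet?, PySem.List.pyIdx?, pvAcore, pvBcore, pvSortedKeysLL, pvVowelsL, List.isPrefixOf, pvTwo]
  | [c, d, e] =>
    rw [Bool.eq_iff_iff]
    simp [PySem.List.pyGet?, PySem.List.pyIdx?, pvAcore, pvBcore, pvSortedKeysLL, pvVowelsL, List.isPrefixOf, pvTwo]
    tauto
  | c :: d :: e :: f :: t =>
    rw [Bool.eq_iff_iff]
    simp [PySem.List.pyGet?, PySem.List.pyIdx?, pvAcore, pvBcore, pvSortedKeysLL, pvVowelsL, List.isPrefixOf, pvTwo,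
      show (2:Int) ≤ (t.length:Int) + 1 + 1 from by omega,
      show (3:Int) ≤ (t.length:Int) + 1 + 1 + 1 from by omega,
      show (2:Int) ≤ (t.length:Int) + 1 + 1 + 1 from by omega,
      show (0:Int) ≤ (t.length:Int) + 1 from by omega,
      show (0:Int) ≤ (t.length:Int) + 1 + 1 from by omega,
      show (0:Int) ≤ (t.length:Int) + 1 + 1 + 1 from by omega]
    constructor
    · intro h
      rcases h with ⟨⟨rfl,rfl⟩,hv⟩|⟨⟨rfl,rfl⟩,hv⟩|⟨⟨rfl,rfl⟩,hv⟩|⟨⟨rfl,rfl⟩,hv⟩|⟨⟨rfl,rfl⟩,hv⟩|⟨⟨rfl,rfl⟩,hv⟩|⟨⟨rfl,rfl⟩,hv⟩|⟨⟨rfl,rfl⟩,hv⟩|⟨⟨rfl,rfl⟩,hv⟩|⟨⟨rfl,rfl⟩,hv⟩|⟨rfl,hv⟩|⟨rfl,hv⟩ <;>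
        first
          | exact Or.inl ⟨by decide, hv⟩
          | exact Or.inr ⟨by decide, hv⟩
    · intro h
      rcases h with ⟨htwo, hv⟩ | ⟨hs, hv⟩
      · rcases htwo with ((⟨rfl, hd⟩ | ⟨rfl, hd⟩) | ⟨rfl, rfl⟩) | ⟨rfl, hd⟩
        · rcases hd with ((rfl|rfl)|rfl)|rfl
          exacts [Or.inl ⟨⟨rfl,rfl⟩,hv⟩, Or.inr (Or.inl ⟨⟨rfl,rfl⟩,hv⟩), Or.inr (Or.inr (Or.inl ⟨⟨rfl,rfl⟩,hv⟩)), Or.inr (Or.inr (Or.inr (Or.inl ⟨⟨rfl,rfl⟩,hv⟩)))]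
        · rcases hd with rfl|rfl
          exacts [Or.inr (Or.inr (Or.inr (Or.inr (Or.inl ⟨⟨rfl,rfl⟩,hv⟩)))), Or.inr (Or.inr (Or.inr (Or.inr (Or.inr (Or.inr (Or.inl ⟨⟨rfl,rfl⟩,hv⟩))))))]
        · exact Or.inr (Or.inr (Or.inr (Or.inr (Or.inr (Or.inl ⟨⟨rfl,rfl⟩,hv⟩)))))
        · rcases hd with (rfl|rfl)|rfl
          exacts [Or.inr (Or.inr (Or.inr (Or.inr (Or.inr (Or.inr (Or.inr (Or.inl ⟨⟨rfl,rfl⟩,hv⟩))))))), Or.inr (Or.inr (Or.inr (Or.inr (Or.inr (Or.inr (Or.inr (Or.inr (Or.inl ⟨⟨rfl,rfl⟩,hv⟩)))))))), Or.inr (Or.inr (Or.inr (Or.inr (Or.inr (Or.inr (Or.inr (Or.inr (Or.inr (Or.inl ⟨⟨rfl,rfl⟩,hv⟩)))))))))]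
      · rcases hs with rfl|rfl
        exacts [Or.inr (Or.inr (Or.inr (Or.inr (Or.inr (Or.inr (Or.inr (Or.inr (Or.inr (Or.inr (Or.inl ⟨rfl,hv⟩)))))))))), Or.inr (Or.inr (Or.inr (Or.inr (Or.inr (Or.inr (Or.inr (Or.inr (Or.inr (Or.inr (Or.inr (⟨rfl,hv⟩)))))))))))]

-- ===== VERDICT =====
theorem is_vcc_negated_spec : Claim_equal_is_vcc_negated := by
  intro word _
  unfold Spec_is_vcc_negated
  rw [pvA_eq, pvB_eq, pv_core]
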